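-- pv_equiv track=rewrite | github.com/Wulfic/Cicada3301 | LiberPrimus/tools/word_boundary_analysis.py | generate_frequency_key
-- ===== SOURCE A (Python) =====
-- from collections import Counter
--
-- def generate_frequency_key(cipher_indices, key_length):
--     """Generate key assuming most common symbol decrypts to E (index 18)."""
--     key = []
--     for i in range(key_length):
--         coset = [cipher_indices[j] for j in range(i, len(cipher_indices), key_length)]
--         if not coset:
--             key.append(0)
--             continue
--         most_common = Counter(coset).most_common(1)[0][0]
--         key.append((most_common - 18) % 29)  # Assume most common -> E
--     return key
-- ===== SOURCE B (Python) =====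
-- from collections import Counter
--
-- def generate_frequency_key(cipher_indices, key_length):
--     """Generate key assuming most common symbol decrypts to E (index 18)."""
--     if key_length <= 0:
--         return []
--     counters = [Counter() for _ in range(key_length)]
--     for j, x in enumerate(cipher_indices):
--         counters[j % key_length][x] += 1
--     key = []
--     for c in counters:
--         if not c:
--             key.append(0)
--         else:
--             key.append((c.most_common(1)[0][0] - 18) % 29)
--     return key
-- ===== Notes on version B (the rewrite author's own statement) =====
-- stated objective: alternative
-- what changed: A makes key_length separate strided passes over cipher_indices (one slice plus a fresh Counter per coset); B makes one sequential pass over cipher_indices filling key_length Counters indexed by j % key_length, then reads each counter's most_common once.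
import Mathlib
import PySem

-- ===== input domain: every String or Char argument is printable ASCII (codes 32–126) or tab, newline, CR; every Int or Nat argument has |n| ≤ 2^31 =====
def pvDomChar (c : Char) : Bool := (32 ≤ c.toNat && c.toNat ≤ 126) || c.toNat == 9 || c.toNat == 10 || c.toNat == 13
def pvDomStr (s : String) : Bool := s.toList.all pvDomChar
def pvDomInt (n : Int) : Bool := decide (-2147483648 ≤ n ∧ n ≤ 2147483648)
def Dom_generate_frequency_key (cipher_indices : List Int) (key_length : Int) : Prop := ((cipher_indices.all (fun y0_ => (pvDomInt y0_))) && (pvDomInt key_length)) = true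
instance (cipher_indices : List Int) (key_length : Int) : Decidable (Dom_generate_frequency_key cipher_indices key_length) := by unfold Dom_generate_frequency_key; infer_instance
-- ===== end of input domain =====

-- B replaces A's per-coset strided rescans by ONE sequential pass filling key_length Counters (different decomposition, same output).

-- ===== PORT A =====
-- Counter(coset).most_common(1)[0][0] = the first item of maximal count in first-seen
-- order; ported as PySem.List.max? (FIRST extremal element) over the counter's items.
def generate_frequency_key (cipher_indices : List Int) (key_length : Int) : List Int :=
  (PySem.List.pyRange 0 key_length 1).foldl (fun key i =>
    let coset := (PySem.List.pyRange i (cipher_indices.length : Int) key_length).map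
      (fun j => PySem.List.pyGetD cipher_indices j 0)   -- cipher_indices[j]: j is always in range here
    if coset.isEmpty then key ++ [0]
    else
      let most_common := (((PySem.List.max? (PySem.Dict.counter coset).items (fun p => p.2)).map Prod.fst).getD 0)
      key ++ [PySem.Int.mod (most_common - 18) 29]) []

-- ===== PORT B =====
def generate_frequency_key_alt (cipher_indices : List Int) (key_length : Int) : List Int :=
  if key_length ≤ 0 then []
  else
    -- counters = [Counter() for _ in range(key_length)]
    let counters0 := (PySem.List.pyRange 0 key_length 1).map
      (fun _ => (PySem.Dict.empty : PySem.Dict Int Int))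
    -- for j, x in enumerate(cipher_indices): counters[j % key_length][x] += 1
    let counters := (PySem.List.enumerate cipher_indices).foldl (fun cs jx =>
      let m := (PySem.Int.mod jx.1 key_length).toNat   -- j % key_length: always a valid index
      cs.set m ((cs.getD m PySem.Dict.empty).modify jx.2 0 (· + 1))) counters0
    counters.map (fun c =>
      if c.items.isEmpty then 0
      else PySem.Int.mod ((((PySem.List.max? c.items (fun p => p.2)).map Prod.fst).getD 0) - 18) 29)

-- ===== PRECONDITION & SPEC =====
def Spec_generate_frequency_key (cipher_indices : List Int) (key_length : Int) (out : List Int) : Prop := out = generate_frequency_key_alt cipher_indices key_length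
instance (cipher_indices : List Int) (key_length : Int) (out : List Int) : Decidable (Spec_generate_frequency_key cipher_indices key_length out) := by unfold Spec_generate_frequency_key; infer_instance

-- ===== CLAIM (what is proved, stated in full; the proofs are below) =====
def Claim_equal_generate_frequency_key : Prop := ∀ (cipher_indices : List Int) (key_length : Int), Dom_generate_frequency_key cipher_indices key_length → Spec_generate_frequency_key cipher_indices key_length (generate_frequency_key cipher_indices key_length)

-- ===== LEMMAS AND PROOFS =====

-- the i-th coset exactly as A builds it
def cosetOf (ci : List Int) (kl i : Int) : List Int :=
  (PySem.List.pyRange i (ci.length : Int) kl).map (fun j => PySem.List.pyGetD ci j 0)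

-- the shared "decrypt the most common symbol to E" entry, from a counter
def entryB (c : PySem.Dict Int Int) : Int :=
  if c.items.isEmpty then 0
  else PySem.Int.mod ((((PySem.List.max? c.items (fun p => p.2)).map Prod.fst).getD 0) - 18) 29

-- A's entry for coset index i
def entryA (ci : List Int) (kl i : Int) : Int :=
  if (cosetOf ci kl i).isEmpty then 0
  else PySem.Int.mod ((((PySem.List.max? (PySem.Dict.counter (cosetOf ci kl i)).items (fun p => p.2)).map Prod.fst).getD 0) - 18) 29

lemma foldl_append_entry (g : Int → Int) :
    ∀ (l : List Int) (acc : List Int),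
      l.foldl (fun key i => key ++ [g i]) acc = acc ++ l.map g := by
  intro l
  induction l with
  | nil => intro acc; simp
  | cons x t ih => intro acc; simp [List.foldl_cons, ih]

lemma A_as_map (ci : List Int) (kl : Int) :
    generate_frequency_key ci kl = (PySem.List.pyRange 0 kl 1).map (entryA ci kl) := by
  unfold generate_frequency_key
  have hbody : (fun (key : List Int) (i : Int) =>
      let coset := (PySem.List.pyRange i (ci.length : Int) kl).map
        (fun j => PySem.List.pyGetD ci j 0)
      if coset.isEmpty then key ++ [0]
      else
        let most_common := (((PySem.List.max? (PySem.Dict.counter coset).items (fun p => p.2)).map Prod.fst).getD 0)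
        key ++ [PySem.Int.mod (most_common - 18) 29])
      = fun key i => key ++ [entryA ci kl i] := by
    funext key i
    simp only [entryA, cosetOf]
    split_ifs <;> rfl
  rw [hbody, foldl_append_entry, List.nil_append]

-- range with positive step: appending the next multiple
lemma pyRange_pos_snoc {a m s : Int} (hs : 0 < s) (ham : a ≤ m) (hd : s ∣ m - a) :
    PySem.List.pyRange a (m + 1) s = PySem.List.pyRange a m s ++ [m] := by
  obtain ⟨q, hq⟩ := hd
  have hq0 : 0 ≤ q := by nlinarith
  have hs0 : s ≠ 0 := by omega
  rw [PySem.List.pyRange_of_pos _ _ hs, PySem.List.pyRange_of_pos _ _ hs]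
  have h1 : a < m + 1 := by omega
  have hc' : (m + 1 - a + s - 1) / s = q + 1 := by
    have : m + 1 - a + s - 1 = s + q * s := by rw [mul_comm] at hq; omega
    rw [this, Int.add_mul_ediv_right _ _ hs0, Int.ediv_self hs0]; omega
  have hcount : (if a < m + 1 then ((m + 1 - a + s - 1) / s).toNat else 0) =
      (if a < m then ((m - a + s - 1) / s).toNat else 0) + 1 := by
    rw [if_pos h1, hc']
    by_cases ham' : a < m
    · rw [if_pos ham']
      have hqpos : 0 < q := by nlinarith
      have hc : (m - a + s - 1) / s = q := by
        have : m - a + s - 1 = (s - 1) + q * s := by rw [mul_comm] at hq; omega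
        rw [this, Int.add_mul_ediv_right _ _ hs0,
          Int.ediv_eq_zero_of_lt (by omega) (by omega)]
        omega
      rw [hc]; omega
    · have hm : m = a := by omega
      have : q = 0 := by nlinarith
      rw [if_neg ham', this]
      rfl
  rw [hcount, List.range_succ, List.map_append]
  congr 1
  simp only [List.map_cons, List.map_nil]
  congr 1
  have : ((if a < m then ((m - a + s - 1) / s).toNat else 0 : Nat) : Int) = q := by
    by_cases ham' : a < m
    · rw [if_pos ham']
      have hqpos : 0 < q := by nlinarith
      have hc : (m - a + s - 1) / s = q := by
        have : m - a + s - 1 = (s - 1) + q * s := by rw [mul_comm] at hq; omega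
        rw [this, Int.add_mul_ediv_right _ _ hs0,
          Int.ediv_eq_zero_of_lt (by omega) (by omega)]
        omega
      rw [hc]; omega
    · have : q = 0 := by nlinarith
      rw [if_neg ham', this]; rfl
  rw [this]
  omega

-- range with positive step: the bound grows past a non-multiple
lemma pyRange_pos_stable {a m s : Int} (hs : 0 < s) (h : ¬(a ≤ m ∧ s ∣ m - a)) :
    PySem.List.pyRange a (m + 1) s = PySem.List.pyRange a m s := by
  have hs0 : s ≠ 0 := by omega
  rw [PySem.List.pyRange_of_pos _ _ hs, PySem.List.pyRange_of_pos _ _ hs]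
  by_cases ham : a ≤ m
  · have hnd : ¬ s ∣ m - a := fun hd => h ⟨ham, hd⟩
    have hne : a ≠ m := by
      intro he; exact hnd (he ▸ ⟨0, by omega⟩)
    have ham' : a < m := by omega
    set d := m - a with hdd
    set q := d / s with hqd
    set r := d % s with hrd
    have hr : 0 ≤ r ∧ r < s := ⟨Int.emod_nonneg d hs0, Int.emod_lt_of_pos d hs⟩
    have hrne : r ≠ 0 := by
      intro h0
      exact hnd (Int.dvd_of_emod_eq_zero h0)
    have hdqr : d = q * s + r := by
      rw [hqd, hrd]
      have h3 := Int.emod_add_mul_ediv d s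
      nlinarith [h3]
    have hc' : (m + 1 - a + s - 1) / s = q + 1 := by
      have : m + 1 - a + s - 1 = r + (q + 1) * s := by
        have : m + 1 - a + s - 1 = d + s := by omega
        rw [this, hdqr]; ring
      rw [this, Int.add_mul_ediv_right _ _ hs0,
        Int.ediv_eq_zero_of_lt (by omega) (by omega)]
      omega
    have hc : (m - a + s - 1) / s = q + 1 := by
      have : m - a + s - 1 = (r + s - 1) + q * s := by
        have : m - a + s - 1 = d + s - 1 := by omega
        rw [this, hdqr]; ring
      rw [this, Int.add_mul_ediv_right _ _ hs0]
      have : (r + s - 1) / s = 1 := by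
        have h2 : r + s - 1 = (r - 1) + 1 * s := by omega
        rw [h2, Int.add_mul_ediv_right _ _ hs0,
          Int.ediv_eq_zero_of_lt (by omega) (by omega)]
        omega
      rw [this]; omega
    rw [if_pos (by omega), if_pos ham', hc, hc']
  · rw [if_neg (by omega), if_neg (by omega)]

lemma pyGetD_append_left (ci ys : List Int) {j : Int} (h0 : 0 ≤ j) (h1 : j < (ci.length : Int)) :
    PySem.List.pyGetD (ci ++ ys) j 0 = PySem.List.pyGetD ci j 0 := by
  rw [PySem.List.pyGetD_eq_getElem _ _ h0 (by simp; omega),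
    PySem.List.pyGetD_eq_getElem _ _ h0 h1,
    List.getElem_append_left (by omega)]

-- mod characterisation of "position n falls in coset t"
lemma mod_eq_iff {n t kl : Int} (hkl : 0 < kl) (hn : 0 ≤ n) (ht0 : 0 ≤ t) (ht1 : t < kl) :
    n % kl = t ↔ t ≤ n ∧ kl ∣ n - t := by
  constructor
  · intro h
    have hdvd : kl ∣ n - t := by
      rw [← h, Int.emod_def]; exact ⟨n / kl, by ring⟩
    refine ⟨?_, hdvd⟩
    obtain ⟨q, hq⟩ := hdvd
    have : 0 ≤ q := by nlinarith
    nlinarith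
  · rintro ⟨hle, q, hq⟩
    have : n = t + q * kl := by rw [mul_comm] at hq; omega
    rw [this, Int.add_mul_emod_self_right]
    exact Int.emod_eq_of_lt ht0 ht1

lemma coset_snoc {ci : List Int} {kl t : Int} (hkl : 0 < kl) (ht0 : 0 ≤ t) (ht1 : t < kl)
    (h : (ci.length : Int) % kl = t) (x : Int) :
    cosetOf (ci ++ [x]) kl t = cosetOf ci kl t ++ [x] := by
  have hn : (0:Int) ≤ (ci.length : Int) := by positivity
  obtain ⟨hle, hdvd⟩ := (mod_eq_iff hkl hn ht0 ht1).mp h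
  unfold cosetOf
  have hlen : (((ci ++ [x]).length : Int)) = (ci.length : Int) + 1 := by simp
  rw [hlen, pyRange_pos_snoc hkl hle hdvd, List.map_append]
  congr 1
  · apply List.map_congr_left
    intro j hj
    obtain ⟨hj0, hj1, _⟩ := (PySem.List.mem_pyRange_iff_of_pos hkl j).mp hj
    exact pyGetD_append_left ci [x] (by omega) hj1
  · simp only [List.map_cons, List.map_nil]
    congr 1
    rw [PySem.List.pyGetD_eq_getElem _ _ hn (by simp)]
    simp

lemma coset_stable {ci : List Int} {kl t : Int} (hkl : 0 < kl) (ht0 : 0 ≤ t) (ht1 : t < kl)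
    (h : (ci.length : Int) % kl ≠ t) (x : Int) :
    cosetOf (ci ++ [x]) kl t = cosetOf ci kl t := by
  have hn : (0:Int) ≤ (ci.length : Int) := by positivity
  have hne : ¬(t ≤ (ci.length : Int) ∧ kl ∣ (ci.length : Int) - t) := by
    intro hc; exact h ((mod_eq_iff hkl hn ht0 ht1).mpr hc)
  unfold cosetOf
  have hlen : (((ci ++ [x]).length : Int)) = (ci.length : Int) + 1 := by simp
  rw [hlen, pyRange_pos_stable hkl hne]
  apply List.map_congr_left
  intro j hj
  obtain ⟨hj0, hj1, _⟩ := (PySem.List.mem_pyRange_iff_of_pos hkl j).mp hj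
  exact pyGetD_append_left ci [x] (by omega) hj1

lemma coset_nil {kl t : Int} (hkl : 0 < kl) (ht0 : 0 ≤ t) : cosetOf [] kl t = [] := by
  unfold cosetOf
  have h0 : PySem.List.pyRange t (((List.length ([] : List Int)) : Nat) : Int) kl = [] := by
    rw [PySem.List.pyRange_of_pos _ _ hkl, if_neg (by simp; omega)]; rfl
  rw [h0]; rfl

-- the single sequential pass fills exactly the per-coset counters
lemma counters_fold (kl : Int) (hkl : 0 < kl) (ci : List Int) :
    (PySem.List.enumerate ci).foldl (fun cs jx =>
        cs.set (PySem.Int.mod jx.1 kl).toNat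
          ((cs.getD (PySem.Int.mod jx.1 kl).toNat PySem.Dict.empty).modify jx.2 0 (· + 1)))
      ((PySem.List.pyRange 0 kl 1).map (fun _ => (PySem.Dict.empty : PySem.Dict Int Int)))
    = (List.range kl.toNat).map (fun i : Nat => PySem.Dict.counter (cosetOf ci kl (i : Int))) := by
  induction ci using List.reverseRecOn with
  | nil =>
      rw [PySem.List.enumerate_nil, List.foldl_nil, PySem.List.pyRange_one, List.map_map]
      have : (kl - 0).toNat = kl.toNat := by omega
      rw [this]
      apply List.map_congr_left
      intro k hk
      rw [coset_nil hkl (by positivity)]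
      rfl
  | append_singleton ci x ih =>
      rw [PySem.List.enumerate_append, List.foldl_append, ih,
        PySem.List.enumerate_cons, PySem.List.enumerate_nil, List.foldl_cons, List.foldl_nil]
      have hn0 : (0:Int) ≤ (ci.length : Int) := by positivity
      set t : Int := (ci.length : Int) % kl with ht
      have ht0 : 0 ≤ t := Int.emod_nonneg _ (by omega)
      have ht1 : t < kl := Int.emod_lt_of_pos _ hkl
      have hfm : PySem.Int.mod (0 + (ci.length : Int)) kl = t := by
        simp only [PySem.Int.mod, Int.fmod_eq_emod, if_pos (Or.inl (le_of_lt hkl)),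
          add_zero, zero_add, ht]
      rw [hfm]
      have hmlt : t.toNat < kl.toNat := by omega
      have hgetD : (((List.range kl.toNat).map
            (fun i : Nat => PySem.Dict.counter (cosetOf ci kl (i : Int)))).getD t.toNat
            PySem.Dict.empty)
          = PySem.Dict.counter (cosetOf ci kl ((t.toNat : Nat) : Int)) := by
        rw [List.getD_eq_getElem _ _ (by simpa using hmlt)]
        simp
      rw [hgetD]
      apply List.ext_getElem
      · simp
      · intro k hk1 hk2
        simp only [List.length_set, List.length_map, List.length_range] at hk1 hk2
        rw [List.getElem_set, List.getElem_map, List.getElem_range]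
        by_cases hkm : t.toNat = k
        · rw [if_pos hkm, List.getElem_map, List.getElem_range]
          have h1 : ((t.toNat : Nat) : Int) = t := by omega
          have h2 : ((k : Nat) : Int) = t := by omega
          rw [h1, h2, coset_snoc hkl ht0 ht1 (by rw [← ht]) x,
            PySem.Dict.counter_append_singleton]
        · rw [if_neg hkm, List.getElem_map, List.getElem_range]
          rw [coset_stable hkl (by positivity) (by omega) (by rw [← ht]; omega) x]

lemma B_as_map (ci : List Int) (kl : Int) (hkl : 0 < kl) :
    generate_frequency_key_alt ci kl
      = (List.range kl.toNat).map (fun i : Nat => entryB (PySem.Dict.counter (cosetOf ci kl (i : Int)))) := by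
  unfold generate_frequency_key_alt
  rw [if_neg (by omega)]
  simp only []
  rw [counters_fold kl hkl ci, List.map_map]
  rfl

lemma counter_items_isEmpty (xs : List Int) :
    (PySem.Dict.counter xs).items.isEmpty = xs.isEmpty := by
  cases xs with
  | nil => rfl
  | cons x t =>
      simp only [List.isEmpty_cons]
      have hx : x ∈ PySem.Set.ofList (x :: t) := by
        rw [PySem.Set.mem_ofList]; exact List.mem_cons_self
      have : (x, ((x :: t).count x : Int)) ∈ (PySem.Dict.counter (x :: t)).items := by
        rw [PySem.Dict.items_counter]
        exact List.mem_map.mpr ⟨x, hx, rfl⟩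
      have hne := List.ne_nil_of_mem this
      cases e : (PySem.Dict.counter (x :: t)).items with
      | nil => exact absurd e hne
      | cons a l => rfl

lemma entryA_eq_entryB (ci : List Int) (kl i : Int) :
    entryA ci kl i = entryB (PySem.Dict.counter (cosetOf ci kl i)) := by
  unfold entryA entryB
  rw [counter_items_isEmpty]

-- ===== VERDICT (by name: the statement is the Claim_ definition above) =====
theorem generate_frequency_key_spec : Claim_equal_generate_frequency_key := by
  intro ci kl _
  unfold Spec_generate_frequency_key
  by_cases hkl : kl ≤ 0
  · unfold generate_frequency_key_alt
    rw [if_pos hkl, A_as_map, PySem.List.pyRange_one_eq_nil (by omega)]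
    rfl
  · have hkl' : 0 < kl := by omega
    rw [A_as_map, B_as_map ci kl hkl', PySem.List.pyRange_one, List.map_map]
    have : (kl - 0).toNat = kl.toNat := by omega
    rw [this]
    apply List.map_congr_left
    intro k _
    simp only [Function.comp_apply, zero_add]
    exact entryA_eq_entryB ci kl (k : Int)
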